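-- pv_equiv track=rewrite | github.com/joyhpc/opendatasheet | scripts/export_design_bundle.py | _choose_default_fpga_template
-- ===== SOURCE A (Python) =====
-- def _choose_default_fpga_template(fpga_templates: list[dict]) -> str | None:
--     if not fpga_templates:
--         return None
--     names = {item.get("name") for item in fpga_templates}
--     for preferred in ("mipi_camera_bridge", "high_speed_link_bridge", "qspi_jtag_bringup", "ddr_memory_interface", "lvds_io_expansion"):
--         if preferred in names:
--             return preferred
--     return fpga_templates[0].get("name")
-- ===== SOURCE B (Python) =====
-- _PRIORITY = {
--     "mipi_camera_bridge": 0,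
--     "high_speed_link_bridge": 1,
--     "qspi_jtag_bringup": 2,
--     "ddr_memory_interface": 3,
--     "lvds_io_expansion": 4,
-- }
--
--
-- def _choose_default_fpga_template(fpga_templates: list[dict]) -> str | None:
--     if not fpga_templates:
--         return None
--     best_rank = None
--     best_name = None
--     for item in fpga_templates:
--         name = item.get("name")
--         rank = _PRIORITY.get(name)
--         if rank is not None and (best_rank is None or rank < best_rank):
--             best_rank = rank
--             best_name = name
--     if best_rank is not None:
--         return best_name
--     return fpga_templates[0].get("name")
-- ===== Notes on version B (the rewrite author's own statement) =====
-- stated objective: alternative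
-- what changed: Instead of materialising a set of all names and scanning the fixed preferred tuple for the first member, B makes a single pass over the templates with a rank table, keeping the item whose preferred-name rank is smallest, and answers from that minimum.
import Mathlib
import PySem

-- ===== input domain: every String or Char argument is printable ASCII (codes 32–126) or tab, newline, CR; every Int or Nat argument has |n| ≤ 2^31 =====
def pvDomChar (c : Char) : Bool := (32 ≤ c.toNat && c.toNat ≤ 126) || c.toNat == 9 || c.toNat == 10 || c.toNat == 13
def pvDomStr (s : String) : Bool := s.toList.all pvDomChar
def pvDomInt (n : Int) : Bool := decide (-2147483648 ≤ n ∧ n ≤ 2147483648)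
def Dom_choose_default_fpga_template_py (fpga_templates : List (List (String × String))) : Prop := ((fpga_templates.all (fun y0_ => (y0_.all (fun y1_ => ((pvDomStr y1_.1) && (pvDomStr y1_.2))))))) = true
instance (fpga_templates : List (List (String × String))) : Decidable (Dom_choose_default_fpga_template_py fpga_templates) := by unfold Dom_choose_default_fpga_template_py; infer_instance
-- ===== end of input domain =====

-- B replaces A's name-set + scan of the preferred tuple by a single pass over the
-- templates with a rank table, keeping the smallest-rank preferred name seen (objective: alternative decomposition, same cost).

-- ===== PORT A =====
-- item.get("name")  (shared by both sources, which both write item.get("name"))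
def pvGetName (item : List (String × String)) : Option String :=
  PySem.Dict.get? (PySem.Dict.mk item) "name"

-- the preferred tuple, in A's order
def pvPrefs : List String :=
  ["mipi_camera_bridge", "high_speed_link_bridge", "qspi_jtag_bringup",
   "ddr_memory_interface", "lvds_io_expansion"]

def choose_default_fpga_template_py (fpga_templates : List (List (String × String))) : Option String :=
  match fpga_templates with
  | [] => none
  | t0 :: _ =>
    -- names = {item.get("name") for item in fpga_templates}
    let names : PySem.Set (Option String) :=
      PySem.Set.ofList (fpga_templates.map (fun item => pvGetName item))
    -- for preferred in (...): if preferred in names: return preferred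
    match pvPrefs.find? (fun preferred => PySem.Set.contains names (some preferred)) with
    | some preferred => some preferred
    | none => pvGetName t0

-- ===== PORT B =====
-- _PRIORITY
def pvPriority : PySem.Dict String Int :=
  PySem.Dict.mk [("mipi_camera_bridge", 0), ("high_speed_link_bridge", 1),
    ("qspi_jtag_bringup", 2), ("ddr_memory_interface", 3), ("lvds_io_expansion", 4)]

-- _PRIORITY.get(name)  (name may be None: Python's dict.get returns None then)
def pvRankOf (name : Option String) : Option Int :=
  match name with
  | none => none
  | some n => PySem.Dict.get? pvPriority n

-- one iteration of B's loop over (best_rank, best_name)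
def pvStep (acc : Option (Int × Option String)) (item : List (String × String)) :
    Option (Int × Option String) :=
  match pvRankOf (pvGetName item), acc with
  | none, _ => acc
  | some r, none => some (r, pvGetName item)
  | some r, some (br, bn) => if r < br then some (r, pvGetName item) else some (br, bn)

def choose_default_fpga_template_py_alt (fpga_templates : List (List (String × String))) : Option String :=
  match fpga_templates with
  | [] => none
  | t0 :: _ =>
    match fpga_templates.foldl pvStep none with
    | some (_, best_name) => best_name
    | none => pvGetName t0

-- ===== PRECONDITION & SPEC =====
def Spec_choose_default_fpga_template_py (fpga_templates : List (List (String × String))) (out : Option String) : Prop := out = choose_default_fpga_template_py_alt fpga_templates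
instance (fpga_templates : List (List (String × String))) (out : Option String) : Decidable (Spec_choose_default_fpga_template_py fpga_templates out) := by unfold Spec_choose_default_fpga_template_py; infer_instance

-- ===== CLAIM (what is proved, stated in full; the proofs are below) =====
def Claim_equal_choose_default_fpga_template_py : Prop := ∀ (fpga_templates : List (List (String × String))), Dom_choose_default_fpga_template_py fpga_templates → Spec_choose_default_fpga_template_py fpga_templates (choose_default_fpga_template_py fpga_templates)

-- ===== LEMMAS AND PROOFS =====

-- the name whose priority rank is r (for r = 0..4)
def pvPrefName (r : Int) : String :=
  if r = 0 then "mipi_camera_bridge" else if r = 1 then "high_speed_link_bridge"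
  else if r = 2 then "qspi_jtag_bringup" else if r = 3 then "ddr_memory_interface"
  else "lvds_io_expansion"

lemma rankOf_char {x : Option String} {r : Int} (h : pvRankOf x = some r) :
    x = some (pvPrefName r) ∧ 0 ≤ r ∧ r ≤ 4 ∧ pvRankOf (some (pvPrefName r)) = some r := by
  cases x with
  | none => simp [pvRankOf] at h
  | some s =>
    simp only [pvRankOf, pvPriority, PySem.Dict.get?_mk_cons, beq_iff_eq] at h
    split_ifs at h with h1 h2 h3 h4 h5
    · obtain rfl := h1; obtain rfl : (0:Int) = r := by simpa using h
      exact ⟨by rfl, by norm_num, by norm_num, by decide⟩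
    · obtain rfl := h2; obtain rfl : (1:Int) = r := by simpa using h
      exact ⟨by rfl, by norm_num, by norm_num, by decide⟩
    · obtain rfl := h3; obtain rfl : (2:Int) = r := by simpa using h
      exact ⟨by rfl, by norm_num, by norm_num, by decide⟩
    · obtain rfl := h4; obtain rfl : (3:Int) = r := by simpa using h
      exact ⟨by rfl, by norm_num, by norm_num, by decide⟩
    · obtain rfl := h5; obtain rfl : (4:Int) = r := by simpa using h
      exact ⟨by rfl, by norm_num, by norm_num, by decide⟩
    · exact absurd h (by simp [PySem.Dict.get?])

-- if no item carries a preferred name, the fold leaves the accumulator alone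
lemma fold_none (l : List (List (String × String)))
    (h : ∀ x ∈ l, pvRankOf (pvGetName x) = none) (acc : Option (Int × Option String)) :
    l.foldl pvStep acc = acc := by
  induction l generalizing acc with
  | nil => rfl
  | cons x l ih =>
    have hx := h x (List.mem_cons_self ..)
    have : pvStep acc x = acc := by simp [pvStep, hx]
    rw [List.foldl_cons, this]
    exact ih (fun y hy => h y (List.mem_cons_of_mem _ hy)) acc

-- once the accumulator holds the minimum rank, the fold keeps it
lemma fold_keep (l : List (List (String × String))) (r : Int) (n : Option String)
    (hmin : ∀ x ∈ l, ∀ s, pvRankOf (pvGetName x) = some s → r ≤ s) :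
    l.foldl pvStep (some (r, n)) = some (r, n) := by
  induction l with
  | nil => rfl
  | cons x l ih =>
    have hstep : pvStep (some (r, n)) x = some (r, n) := by
      cases hx : pvRankOf (pvGetName x) with
      | none => simp [pvStep, hx]
      | some s =>
        have : r ≤ s := hmin x (List.mem_cons_self ..) s hx
        simp only [pvStep, hx]
        rw [if_neg (by omega : ¬ s < r)]
    rw [List.foldl_cons, hstep]
    exact ih (fun y hy => hmin y (List.mem_cons_of_mem _ hy))

-- the fold computes the minimum preferred rank present, together with its name
lemma fold_min (l : List (List (String × String))) (r : Int)
    (hmin : ∀ x ∈ l, ∀ s, pvRankOf (pvGetName x) = some s → r ≤ s)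
    (hex : ∃ x ∈ l, pvRankOf (pvGetName x) = some r)
    (acc : Option (Int × Option String))
    (hacc : acc = none ∨ ∃ b, r ≤ b ∧ pvRankOf (some (pvPrefName b)) = some b ∧
      acc = some (b, some (pvPrefName b))) :
    l.foldl pvStep acc = some (r, some (pvPrefName r)) := by
  induction l generalizing acc with
  | nil => obtain ⟨x, hx, _⟩ := hex; simp at hx
  | cons x l ih =>
    have hmin' : ∀ y ∈ l, ∀ s, pvRankOf (pvGetName y) = some s → r ≤ s :=
      fun y hy => hmin y (List.mem_cons_of_mem _ hy)
    rw [List.foldl_cons]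
    cases hx : pvRankOf (pvGetName x) with
    | none =>
      have hstep : pvStep acc x = acc := by simp [pvStep, hx]
      rw [hstep]
      refine ih hmin' ?_ acc hacc
      obtain ⟨y, hy, hry⟩ := hex
      rcases List.mem_cons.mp hy with rfl | hy'
      · rw [hx] at hry; exact absurd hry (by simp)
      · exact ⟨y, hy', hry⟩
    | some s =>
      have hrs : r ≤ s := hmin x (List.mem_cons_self ..) s hx
      obtain ⟨hname, _, _, hsgood⟩ := rankOf_char hx
      -- the new accumulator after the head
      rcases hacc with rfl | ⟨b, hrb, hbgood, rfl⟩
      · have hstep : pvStep none x = some (s, some (pvPrefName s)) := by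
          simp [pvStep, hname, hsgood]
        rw [hstep]
        by_cases hsr : s = r
        · subst hsr; exact fold_keep l s _ hmin'
        · refine ih hmin' ?_ _ (Or.inr ⟨s, hrs, hsgood, rfl⟩)
          obtain ⟨y, hy, hry⟩ := hex
          rcases List.mem_cons.mp hy with rfl | hy'
          · rw [hx] at hry; exact absurd hry (by simp [hsr])
          · exact ⟨y, hy', hry⟩
      · by_cases hsb : s < b
        · have hstep : pvStep (some (b, some (pvPrefName b))) x
              = some (s, some (pvPrefName s)) := by
            simp only [pvStep, hname, hsgood]
            rw [if_pos hsb]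
          rw [hstep]
          by_cases hsr : s = r
          · subst hsr; exact fold_keep l s _ hmin'
          · refine ih hmin' ?_ _ (Or.inr ⟨s, hrs, hsgood, rfl⟩)
            obtain ⟨y, hy, hry⟩ := hex
            rcases List.mem_cons.mp hy with rfl | hy'
            · rw [hx] at hry; exact absurd hry (by simp [hsr])
            · exact ⟨y, hy', hry⟩
        · have hstep : pvStep (some (b, some (pvPrefName b))) x
              = some (b, some (pvPrefName b)) := by
            simp only [pvStep, hx]
            rw [if_neg hsb]
          rw [hstep]
          by_cases hbr : b = r
          · subst hbr; exact fold_keep l b _ hmin'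
          · refine ih hmin' ?_ _ (Or.inr ⟨b, hrb, hbgood, rfl⟩)
            obtain ⟨y, hy, hry⟩ := hex
            rcases List.mem_cons.mp hy with rfl | hy'
            · -- head's rank s would have to be r, but then b = r since r ≤ b ≤ s = r
              rw [hx] at hry
              obtain rfl : s = r := by simpa using hry
              omega
            · exact ⟨y, hy', hry⟩

-- membership of the i-th preferred name among the item names, as a rank witness
lemma mem_rank {ts : List (List (String × String))} {r : Int}
    (h : some (pvPrefName r) ∈ ts.map (fun item => pvGetName item))
    (hgood : pvRankOf (some (pvPrefName r)) = some r) :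
    ∃ x ∈ ts, pvRankOf (pvGetName x) = some r := by
  obtain ⟨x, hx, hxe⟩ := List.mem_map.mp h
  exact ⟨x, hx, by rw [hxe, hgood]⟩

-- ===== VERDICT (by name: the statement is the Claim_ definition above) =====
theorem choose_default_fpga_template_py_spec : Claim_equal_choose_default_fpga_template_py := by
  intro ts _
  unfold Spec_choose_default_fpga_template_py
  cases ts with
  | nil => rfl
  | cons t0 rest =>
    set Ts := t0 :: rest with hTs
    set ns := Ts.map (fun item => pvGetName item) with hns
    -- A unfolds to a chain of membership tests on the five preferred names
    have hA : choose_default_fpga_template_py Ts =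
        (if some "mipi_camera_bridge" ∈ ns then some "mipi_camera_bridge"
         else if some "high_speed_link_bridge" ∈ ns then some "high_speed_link_bridge"
         else if some "qspi_jtag_bringup" ∈ ns then some "qspi_jtag_bringup"
         else if some "ddr_memory_interface" ∈ ns then some "ddr_memory_interface"
         else if some "lvds_io_expansion" ∈ ns then some "lvds_io_expansion"
         else pvGetName t0) := by
      rw [hTs]
      simp only [choose_default_fpga_template_py, pvPrefs, List.find?]
      simp only [← hTs, ← hns]
      by_cases h0 : some "mipi_camera_bridge" ∈ ns <;>
        by_cases h1 : some "high_speed_link_bridge" ∈ ns <;>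
          by_cases h2 : some "qspi_jtag_bringup" ∈ ns <;>
            by_cases h3 : some "ddr_memory_interface" ∈ ns <;>
              by_cases h4 : some "lvds_io_expansion" ∈ ns <;>
                simp [h0, h1, h2, h3, h4]
    -- the minimality fact used on each branch
    have key : ∀ r : Int,
        (∀ s : Int, 0 ≤ s → s < r → some (pvPrefName s) ∉ ns) →
        ∀ x ∈ Ts, ∀ s, pvRankOf (pvGetName x) = some s → r ≤ s := by
      intro r habs x hx s hs
      obtain ⟨hname, hs0, _, _⟩ := rankOf_char hs
      by_contra hlt
      exact habs s hs0 (by omega)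
        (by rw [← hname]; exact List.mem_map.mpr ⟨x, hx, rfl⟩)
    have hBfold : ∀ r : Int, pvRankOf (some (pvPrefName r)) = some r →
        some (pvPrefName r) ∈ ns →
        (∀ s : Int, 0 ≤ s → s < r → some (pvPrefName s) ∉ ns) →
        Ts.foldl pvStep none = some (r, some (pvPrefName r)) := by
      intro r hgood hmem habs
      exact fold_min Ts r (key r habs) (mem_rank hmem hgood) none (Or.inl rfl)
    have hB : ∀ r : Int, pvRankOf (some (pvPrefName r)) = some r →
        some (pvPrefName r) ∈ ns →
        (∀ s : Int, 0 ≤ s → s < r → some (pvPrefName s) ∉ ns) →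
        choose_default_fpga_template_py_alt Ts = some (pvPrefName r) := by
      intro r hgood hmem habs
      rw [hTs]
      simp only [choose_default_fpga_template_py_alt]
      rw [← hTs, hBfold r hgood hmem habs]
    have hint : ∀ s : Int, 0 ≤ s → s < 5 →
        pvPrefName s = "mipi_camera_bridge" ∨ pvPrefName s = "high_speed_link_bridge" ∨
        pvPrefName s = "qspi_jtag_bringup" ∨ pvPrefName s = "ddr_memory_interface" ∨
        pvPrefName s = "lvds_io_expansion" := by
      intro s h0 h5
      have : s = 0 ∨ s = 1 ∨ s = 2 ∨ s = 3 ∨ s = 4 := by omega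
      rcases this with rfl | rfl | rfl | rfl | rfl <;> simp [pvPrefName]
    by_cases h0 : some "mipi_camera_bridge" ∈ ns
    · rw [hA, if_pos h0, hB 0 (by decide) (by exact h0) (by intro s hs0 hs; omega)]; rfl
    · by_cases h1 : some "high_speed_link_bridge" ∈ ns
      · rw [hA, if_neg h0, if_pos h1, hB 1 (by decide) (by exact h1) ?_]
        · rfl
        · intro s hs0 hs
          obtain rfl : s = 0 := by omega
          simpa [pvPrefName] using h0
      · by_cases h2 : some "qspi_jtag_bringup" ∈ ns
        · rw [hA, if_neg h0, if_neg h1, if_pos h2, hB 2 (by decide) (by exact h2) ?_]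
          · rfl
          · intro s hs0 hs
            have : s = 0 ∨ s = 1 := by omega
            rcases this with rfl | rfl
            · simpa [pvPrefName] using h0
            · simpa [pvPrefName] using h1
        · by_cases h3 : some "ddr_memory_interface" ∈ ns
          · rw [hA, if_neg h0, if_neg h1, if_neg h2, if_pos h3,
              hB 3 (by decide) (by exact h3) ?_]
            · rfl
            · intro s hs0 hs
              have : s = 0 ∨ s = 1 ∨ s = 2 := by omega
              rcases this with rfl | rfl | rfl
              · simpa [pvPrefName] using h0
              · simpa [pvPrefName] using h1
              · simpa [pvPrefName] using h2
          · by_cases h4 : some "lvds_io_expansion" ∈ ns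
            · rw [hA, if_neg h0, if_neg h1, if_neg h2, if_neg h3, if_pos h4,
                hB 4 (by decide) (by exact h4) ?_]
              · rfl
              · intro s hs0 hs
                have : s = 0 ∨ s = 1 ∨ s = 2 ∨ s = 3 := by omega
                rcases this with rfl | rfl | rfl | rfl
                · simpa [pvPrefName] using h0
                · simpa [pvPrefName] using h1
                · simpa [pvPrefName] using h2
                · simpa [pvPrefName] using h3
            · -- no preferred name present: both fall back to the first item's name
              have hall : ∀ x ∈ Ts, pvRankOf (pvGetName x) = none := by
                intro x hx
                cases hr : pvRankOf (pvGetName x) with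
                | none => rfl
                | some s =>
                  obtain ⟨hname, hs0, hs4, _⟩ := rankOf_char hr
                  have hmem : some (pvPrefName s) ∈ ns := by
                    rw [← hname]; exact List.mem_map.mpr ⟨x, hx, rfl⟩
                  rcases hint s hs0 (by omega) with h | h | h | h | h <;>
                    rw [h] at hmem <;> tauto
              rw [hA, if_neg h0, if_neg h1, if_neg h2, if_neg h3, if_neg h4]
              rw [hTs]
              simp only [choose_default_fpga_template_py_alt]
              rw [← hTs, fold_none Ts hall none]
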